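-- pv_equiv track=rewrite | github.com/amandabraga/exercises | exercise3/exercise3.py | reverse_and_format
-- ===== SOURCE A (Python) =====
-- def last_char_is_a_space(name, index):
--     return (index - 1 >= 0) and (name[index-1] == " ")
--
-- def reverse_and_format(name):
--     if not isinstance(name, str):
--         raise TypeError("Name should be a string")
--
--     name = name.strip()
--     result = ""
--     index = len(name) - 1
--
--     while(index >= 0):
--         if (index == 0) or last_char_is_a_space(name, index):
--             result += name[index].upper()
--         else:
--             result += name[index].lower()
--
--         index -= 1
--
--     return result
-- ===== SOURCE B (Python) =====
-- def reverse_and_format(name):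
--     if not isinstance(name, str):
--         raise TypeError("Name should be a string")
--
--     name = name.strip()
--     transformed = ' '.join(w[:1].upper() + w[1:].lower() for w in name.split(' '))
--     return transformed[::-1]
-- ===== Notes on version B (the rewrite author's own statement) =====
-- stated objective: faster
-- what changed: Replaced the backward character-index while-loop (with its predecessor-lookup helper and quadratic string concatenation) by a word-level pass: split on the single-space separator, capitalize each word's head and lowercase its tail, join, and reverse the whole string once.
import Mathlib
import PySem

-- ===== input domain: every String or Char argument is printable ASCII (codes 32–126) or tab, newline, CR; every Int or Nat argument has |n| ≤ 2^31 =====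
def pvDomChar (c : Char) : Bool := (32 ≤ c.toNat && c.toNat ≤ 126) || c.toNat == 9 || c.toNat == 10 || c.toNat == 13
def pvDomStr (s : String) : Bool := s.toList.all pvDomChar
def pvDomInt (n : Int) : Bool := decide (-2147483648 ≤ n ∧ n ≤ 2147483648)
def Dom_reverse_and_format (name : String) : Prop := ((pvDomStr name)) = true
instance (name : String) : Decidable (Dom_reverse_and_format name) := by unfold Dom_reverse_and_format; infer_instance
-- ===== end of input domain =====

-- B replaces A's backward index loop (with its predecessor check) by a word-level pass
-- (split on ' ', capitalize head / lowercase tail of each word, join) plus one final reversal.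

-- ===== PORT A =====
-- helper: last_char_is_a_space(name, index)
def pvLastCharIsSpace (name : List Char) (index : Int) : Bool :=
  decide (index - 1 ≥ 0) && (PySem.List.pyGet? name (index - 1) == some ' ')

-- the while loop; name[index] is in range at every reachable call, so getD never supplies its default
def pvRafLoop (name : List Char) (index : Int) (result : List Char) : List Char :=
  if h : index ≥ 0 then
    let c := (PySem.List.pyGet? name index).getD ' '
    let result := result ++
      (if (index == 0) || pvLastCharIsSpace name index
       then [PySem.Chars.upperChar c] else [PySem.Chars.lowerChar c])
    pvRafLoop name (index - 1) result
  else result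
termination_by (index + 1).toNat
decreasing_by omega

def reverse_and_format (name : String) : String :=
  let name := (PySem.Str.strip name).toList
  String.ofList (pvRafLoop name ((name.length : Int) - 1) [])

-- ===== PORT B =====
def reverse_and_format_alt (name : String) : String :=
  let name := (PySem.Str.strip name).toList
  let transformed := PySem.Chars.join [' ']
    ((PySem.Chars.splitOn name [' ']).map (fun w =>
      PySem.Chars.upper (PySem.List.slice w none (some 1)) ++
      PySem.Chars.lower (PySem.List.slice w (some 1) none)))
  String.ofList ((PySem.List.slice? transformed none none (-1)).getD [])

-- ===== PRECONDITION & SPEC =====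
def Spec_reverse_and_format (name : String) (out : String) : Prop := out = reverse_and_format_alt name
instance (name : String) (out : String) : Decidable (Spec_reverse_and_format name out) := by unfold Spec_reverse_and_format; infer_instance

-- ===== CLAIM (what is proved, stated in full; the proofs are below) =====
def Claim_equal_reverse_and_format : Prop := ∀ (name : String), Dom_reverse_and_format name → Spec_reverse_and_format name (reverse_and_format name)

-- ===== LEMMAS AND PROOFS =====

-- the forward transform: first char uppercased, later chars uppercased iff preceded by ' '
def pvFmtTail (p : Char) : List Char → List Char
  | [] => []
  | c :: rest => (if p == ' ' then PySem.Chars.upperChar c else PySem.Chars.lowerChar c) :: pvFmtTail c rest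

def pvFwd : List Char → List Char
  | [] => []
  | c :: rest => PySem.Chars.upperChar c :: pvFmtTail c rest

-- the standard single-char split
def pvSplit1 : List Char → List (List Char)
  | [] => [[]]
  | c :: rest =>
    if c = ' ' then [] :: pvSplit1 rest
    else match pvSplit1 rest with
      | [] => [[c]]          -- unreachable: pvSplit1 never returns []
      | h :: t => (c :: h) :: t

def pvConsHead (x : List Char) : List (List Char) → List (List Char)
  | [] => [x]
  | h :: t => (x ++ h) :: t

theorem pvSplit1_ne_nil (cs : List Char) : pvSplit1 cs ≠ [] := by
  cases cs with
  | nil => simp [pvSplit1]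
  | cons c rest =>
    simp only [pvSplit1]
    split
    · simp
    · cases h : pvSplit1 rest <;> simp

theorem pvGo_eq (fuel : Nat) (l cur : List Char) (acc : List (List Char)) (hf : l.length ≤ fuel) :
    PySem.Chars.splitOn.go [' '] fuel l cur acc =
      acc.reverse ++ pvConsHead cur.reverse (pvSplit1 l) := by
  induction fuel generalizing l cur acc with
  | zero =>
    have : l = [] := by cases l <;> simp_all
    subst this
    simp [PySem.Chars.splitOn.go, pvSplit1, pvConsHead]
  | succ fuel ih =>
    cases l with
    | nil => simp [PySem.Chars.splitOn.go, pvSplit1, pvConsHead]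
    | cons c rest =>
      simp only [PySem.Chars.splitOn.go]
      by_cases hc : c = ' '
      · subst hc
        rw [if_pos (by simp [List.isPrefixOf])]
        rw [show List.drop [' '].length (' ' :: rest) = rest from rfl]
        rw [ih rest [] (List.reverse cur :: acc) (by simpa using Nat.le_of_succ_le_succ hf)]
        simp [pvSplit1, pvConsHead]
        cases h : pvSplit1 rest with
        | nil => exact absurd h (pvSplit1_ne_nil rest)
        | cons h' t => simp
      · rw [if_neg (by simp [List.isPrefixOf]; exact fun h => hc h.symm)]
        rw [ih rest (c :: cur) acc (by simpa using Nat.le_of_succ_le_succ hf)]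
        simp only [pvSplit1, if_neg hc]
        cases h : pvSplit1 rest with
        | nil => exact absurd h (pvSplit1_ne_nil rest)
        | cons h' t => simp [pvConsHead]


theorem pvSplitOn_eq (cs : List Char) : PySem.Chars.splitOn cs [' '] = pvSplit1 cs := by
  have h2 := pvGo_eq (cs.length + 1) cs [] [] (by omega)
  rw [PySem.Chars.splitOn, h2]
  cases h : pvSplit1 cs with
  | nil => exact absurd h (pvSplit1_ne_nil cs)
  | cons h' t => simp [pvConsHead]

-- per-word transform used by B, on the list level
def pvCapWord (w : List Char) : List Char :=
  PySem.Chars.upper (PySem.List.slice w none (some 1)) ++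
  PySem.Chars.lower (PySem.List.slice w (some 1) none)

theorem pvCapWord_nil : pvCapWord [] = [] := by decide

theorem pvCapWord_cons (c : Char) (h : List Char) :
    pvCapWord (c :: h) = PySem.Chars.upperChar c :: h.map PySem.Chars.lowerChar := by
  simp [pvCapWord, PySem.List.slice_to, PySem.List.slice_from_one,
    PySem.Chars.upper, PySem.Chars.lower]

theorem pvFmtTail_space (xs : List Char) : pvFmtTail ' ' xs = pvFwd xs := by
  cases xs <;> simp [pvFmtTail, pvFwd]

-- joined word transform = forward transform, with the mid-word companion statement
theorem pvJoin_eq (cs : List Char) :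
    (PySem.Chars.join [' '] ((pvSplit1 cs).map pvCapWord) = pvFwd cs) ∧
    (∀ p : Char, p ≠ ' ' →
      (match pvSplit1 cs with
        | [] => []
        | h :: t => h.map PySem.Chars.lowerChar ++
            (if t = [] then [] else ' ' :: PySem.Chars.join [' '] (t.map pvCapWord)))
      = pvFmtTail p cs) := by
  induction cs with
  | nil =>
    constructor
    · rw [show pvSplit1 [] = [[]] from rfl, List.map_cons, List.map_nil, pvCapWord_nil,
        PySem.Chars.join_singleton]; rfl
    · intro p _; simp [pvSplit1, pvFmtTail]
  | cons c rest ih =>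
    obtain ⟨ih1, ih2⟩ := ih
    by_cases hc : c = ' '
    · subst hc
      have hsp : pvSplit1 (' ' :: rest) = [] :: pvSplit1 rest := by simp [pvSplit1]
      constructor
      · rw [hsp]
        cases h : pvSplit1 rest with
        | nil => exact absurd h (pvSplit1_ne_nil rest)
        | cons h' t =>
          rw [h] at ih1
          rw [List.map_cons, List.map_cons, pvCapWord_nil, PySem.Chars.join_cons_cons,
            show pvFwd (' ' :: rest) = PySem.Chars.upperChar ' ' :: pvFmtTail ' ' rest from rfl,
            pvFmtTail_space, show PySem.Chars.upperChar ' ' = ' ' from rfl]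
          rw [List.map_cons] at ih1
          rw [ih1]
          simp
      · intro p hp
        rw [hsp]
        cases h : pvSplit1 rest with
        | nil => exact absurd h (pvSplit1_ne_nil rest)
        | cons h' t =>
          rw [h] at ih1
          rw [show pvFmtTail p (' ' :: rest) = PySem.Chars.lowerChar ' ' :: pvFmtTail ' ' rest by
            simp [pvFmtTail, hp], pvFmtTail_space,
            show PySem.Chars.lowerChar ' ' = ' ' from rfl, ← ih1]
          simp
    · have hsplit : ∃ h t, pvSplit1 rest = h :: t := by
        cases h : pvSplit1 rest with
        | nil => exact absurd h (pvSplit1_ne_nil rest)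
        | cons h' t => exact ⟨h', t, rfl⟩
      obtain ⟨h, t, hst⟩ := hsplit
      have key : h.map PySem.Chars.lowerChar ++
          (if t = [] then [] else ' ' :: PySem.Chars.join [' '] (t.map pvCapWord))
          = pvFmtTail c rest := by
        have := ih2 c hc
        rw [hst] at this
        exact this
      constructor
      · simp only [pvSplit1, if_neg hc, hst, List.map_cons, pvCapWord_cons]
        rw [show pvFwd (c :: rest) = PySem.Chars.upperChar c :: pvFmtTail c rest from rfl]
        rw [← key]
        cases t with
        | nil => rw [List.map_nil, PySem.Chars.join_singleton]; simp
        | cons t0 ts =>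
          rw [List.map_cons, PySem.Chars.join_cons_cons]
          simp
      · intro p hp
        simp only [pvSplit1, if_neg hc, hst, List.map_cons]
        rw [show pvFmtTail p (c :: rest) = PySem.Chars.lowerChar c :: pvFmtTail c rest by
          simp [pvFmtTail, hp]]
        rw [← key]
        cases t with
        | nil => simp
        | cons t0 ts => simp

theorem pvFmtTail_length (p : Char) (xs : List Char) : (pvFmtTail p xs).length = xs.length := by
  induction xs generalizing p with
  | nil => rfl
  | cons c rest ih => simp [pvFmtTail, ih]

theorem pvFwd_length (cs : List Char) : (pvFwd cs).length = cs.length := by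
  cases cs with
  | nil => rfl
  | cons c rest => simp [pvFwd, pvFmtTail_length]

theorem pvFmtTail_get (p : Char) (xs : List Char) (k : Nat) (hk : k < xs.length) :
    (pvFmtTail p xs)[k]'(by rw [pvFmtTail_length]; exact hk) =
      (if (if k = 0 then p else xs[k-1]'(by omega)) = ' '
       then PySem.Chars.upperChar (xs[k]'hk) else PySem.Chars.lowerChar (xs[k]'hk)) := by
  induction xs generalizing p k with
  | nil => simp at hk
  | cons c rest ih =>
    cases k with
    | zero => simp [pvFmtTail]
    | succ k =>
      have hk' : k < rest.length := by simpa using hk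
      have := ih c k hk'
      simp only [pvFmtTail]
      cases k with
      | zero => simpa using this
      | succ k => simpa using this

theorem pvFwd_get (cs : List Char) (k : Nat) (hk : k < cs.length) :
    (pvFwd cs)[k]'(by rw [pvFwd_length]; exact hk) =
      (if k = 0 ∨ (cs[k-1]'(by omega)) = ' '
       then PySem.Chars.upperChar (cs[k]'hk) else PySem.Chars.lowerChar (cs[k]'hk)) := by
  cases cs with
  | nil => simp at hk
  | cons c rest =>
    cases k with
    | zero => simp [pvFwd]
    | succ k =>
      have hk' : k < rest.length := by simpa using hk
      have := pvFmtTail_get c rest k hk'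
      simp only [pvFwd]
      cases k with
      | zero => simpa using this
      | succ k => simpa using this

theorem pvRafLoop_eq (cs : List Char) (k : Nat) (hk : k ≤ cs.length) (acc : List Char) :
    pvRafLoop cs ((k : Int) - 1) acc = acc ++ ((pvFwd cs).take k).reverse := by
  induction k generalizing acc with
  | zero => rw [pvRafLoop.eq_def]; simp
  | succ k ih =>
    have hklt : k < cs.length := by omega
    have hget : PySem.List.pyGet? cs (((k : Nat) + 1 : Int) - 1) = some (cs[k]'hklt) := by
      have : (((k : Nat) + 1 : Int) - 1) = ((k : Nat) : Int) := by omega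
      rw [this, PySem.List.pyGet?_natCast]
      simp [hklt]
    rw [pvRafLoop.eq_def]
    rw [dif_pos (by push_cast; omega)]
    push_cast
    simp only [hget, Option.getD_some]
    have hcond : ((((k : Nat) + 1 : Int) - 1 == 0) || pvLastCharIsSpace cs (((k : Nat) + 1 : Int) - 1)) =
        decide (k = 0 ∨ (cs[k-1]'(by omega)) = ' ') := by
      have he : (((k : Nat) + 1 : Int) - 1) = ((k : Nat) : Int) := by omega
      rw [he]
      unfold pvLastCharIsSpace
      cases k with
      | zero => simp
      | succ j =>
        have hj : j < cs.length := by omega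
        have h1 : ((j + 1 : Nat) : Int) - 1 = ((j : Nat) : Int) := by push_cast; omega
        rw [h1, PySem.List.pyGet?_natCast, List.getElem?_eq_getElem hj]
        have h2 : ((((j + 1 : Nat)) : Int) == 0) = false := by
          rw [beq_eq_false_iff_ne]; push_cast; omega
        rw [h2]
        simp [beq_eq_decide]
    have harith : (((k : Nat) + 1 : Int) - 1 - 1) = ((k : Nat) : Int) - 1 := by omega
    rw [hcond, harith]
    rw [ih (by omega)]
    have htake : ((pvFwd cs).take (k + 1)).reverse =
        ((pvFwd cs)[k]'(by rw [pvFwd_length]; exact hklt)) :: ((pvFwd cs).take k).reverse := by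
      rw [List.take_add_one]
      simp [List.getElem?_eq_getElem (by rw [pvFwd_length]; exact hklt)]
    rw [htake, pvFwd_get cs k hklt]
    by_cases hc : k = 0 ∨ (cs[k-1]'(by omega)) = ' '
    · simp [hc]
    · simp [hc]

theorem pvMain (cs : List Char) :
    pvRafLoop cs ((cs.length : Int) - 1) [] =
      (PySem.List.slice?
        (PySem.Chars.join [' ']
          ((PySem.Chars.splitOn cs [' ']).map (fun w =>
            PySem.Chars.upper (PySem.List.slice w none (some 1)) ++
            PySem.Chars.lower (PySem.List.slice w (some 1) none))))
        none none (-1)).getD [] := by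
  rw [PySem.List.slice?_none_none_neg_one, Option.getD_some]
  rw [show (fun w => PySem.Chars.upper (PySem.List.slice w none (some 1)) ++
        PySem.Chars.lower (PySem.List.slice w (some 1) none)) = pvCapWord from rfl]
  rw [pvSplitOn_eq, (pvJoin_eq cs).1]
  rw [pvRafLoop_eq cs cs.length (le_refl _) []]
  simp [pvFwd_length]

-- ===== VERDICT (by name: the statement is the Claim_ definition above) =====
theorem reverse_and_format_spec : Claim_equal_reverse_and_format := by
  intro name _
  show reverse_and_format name = reverse_and_format_alt name
  exact congrArg String.ofList (pvMain (PySem.Str.strip name).toList)
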